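-- pv_equiv track=rewrite | github.com/dozybot001/maars | backend/plan/graph.py | get_ancestor_chain
-- ===== SOURCE A (Python) =====
-- from typing import Any, Dict, List, Optional, Set, Tuple
--
-- def get_parent_id(task_id: str) -> str:
--     """Get parent task_id. E.g. '1_2' -> '1', '1' -> '0'."""
--     if "_" in task_id:
--         return task_id.rsplit("_", 1)[0]
--     return "0"
--
-- def get_ancestor_chain(task_id: str) -> List[str]:
--     """Return ancestor ids from immediate parent up to root, e.g. '1_2_3' -> ['1_2', '1', '0']."""
--     chain = []
--     curr = task_id
--     while True:
--         parent = get_parent_id(curr)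
--         chain.append(parent)
--         if parent == "0":
--             break
--         curr = parent
--     return chain
-- ===== SOURCE B (Python) =====
-- from typing import List
--
-- def get_ancestor_chain(task_id: str) -> List[str]:
--     """Return ancestor ids from immediate parent up to root, e.g. '1_2_3' -> ['1_2', '1', '0']."""
--     cuts = [i for i, c in enumerate(task_id) if c == '_']
--     chain = [task_id[:i] for i in reversed(cuts)] + ['0']
--     return chain[:chain.index('0') + 1]
-- ===== Notes on version B (the rewrite author's own statement) =====
-- stated objective: alternative
-- what changed: B scans the string once for underscore positions and emits the ancestor chain as prefix slices truncated at the first root id, instead of A's loop that repeatedly rsplits a shrinking string.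
import Mathlib
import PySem

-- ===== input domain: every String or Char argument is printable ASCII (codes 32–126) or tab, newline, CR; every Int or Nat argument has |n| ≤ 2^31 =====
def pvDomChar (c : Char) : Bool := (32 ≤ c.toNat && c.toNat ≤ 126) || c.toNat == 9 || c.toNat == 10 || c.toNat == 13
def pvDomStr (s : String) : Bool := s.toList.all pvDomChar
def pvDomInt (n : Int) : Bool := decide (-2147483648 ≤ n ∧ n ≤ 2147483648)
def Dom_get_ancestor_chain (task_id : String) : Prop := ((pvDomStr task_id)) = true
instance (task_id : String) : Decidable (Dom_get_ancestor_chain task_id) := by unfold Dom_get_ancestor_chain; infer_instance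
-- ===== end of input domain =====

-- B builds the ancestor chain from underscore positions (one scan + prefix slices, cut at the first '0')
-- instead of A's loop of repeated rsplits on a shrinking string; objective: alternative decomposition.


-- ===== PORT A =====
-- task_id.rsplit("_", 1)[0] for a string that contains '_': everything before the LAST '_'.
-- Hand port (PySem has no rsplit): drop, from the right, everything up to and including the first '_'.
-- Exact: Python's rsplit("_", 1)[0] is precisely the prefix before the last occurrence of '_'.
def pvNotU (c : Char) : Bool := c != '_'

def pvRsplitPrefix (cs : List Char) : List Char :=
  (((cs.reverse).dropWhile pvNotU).tail).reverse

-- get_parent_id, on List Char ("_" in task_id -> PySem.Chars.isIn)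
def get_parent_id_c (cs : List Char) : List Char :=
  if PySem.Chars.isIn ['_'] cs then pvRsplitPrefix cs else ['0']

-- decomposition at the LAST underscore (used by the port's termination proof, cited in decreasing_by)
lemma pv_exists_last_underscore {cs : List Char} (h : '_' ∈ cs) :
    ∃ a t, cs = a ++ '_' :: t ∧ '_' ∉ t := by
  induction cs with
  | nil => simp at h
  | cons c rest ih =>
    by_cases hr : '_' ∈ rest
    · obtain ⟨a, t, hat, ht⟩ := ih hr
      exact ⟨c :: a, t, by simp [hat], ht⟩
    · have hc : c = '_' := by
        rcases List.mem_cons.mp h with h1 | h2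
        · exact h1.symm
        · exact absurd h2 hr
      exact ⟨[], rest, by simp [hc], hr⟩

lemma pv_dropWhile_last (u r : List Char) (hu : '_' ∉ u) :
    (u ++ '_' :: r).dropWhile pvNotU = '_' :: r := by
  induction u with
  | nil => simp [pvNotU]
  | cons c cu ih =>
    have hc : c ≠ '_' := fun hh => hu (by simp [hh])
    have hcu : '_' ∉ cu := fun hh => hu (by simp [hh])
    simp only [List.cons_append, List.dropWhile_cons]
    simp [pvNotU, hc, ih hcu]

lemma pv_rsplitPrefix_eq (a t : List Char) (ht : '_' ∉ t) :
    pvRsplitPrefix (a ++ '_' :: t) = a := by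
  unfold pvRsplitPrefix
  have hrev : (a ++ '_' :: t).reverse = t.reverse ++ '_' :: a.reverse := by simp
  have ht' : '_' ∉ t.reverse := by simpa using ht
  rw [hrev, pv_dropWhile_last _ _ ht']
  simp

lemma pv_isIn_underscore (cs : List Char) :
    PySem.Chars.isIn ['_'] cs = true ↔ '_' ∈ cs := by
  rw [PySem.Chars.isIn_iff_infix]
  constructor
  · intro h; exact h.mem (by simp)
  · intro h
    obtain ⟨s, t, hst⟩ := List.append_of_mem h
    exact ⟨s, t, by simp [hst]⟩

lemma pv_parent_length_lt (cs : List Char) (h : get_parent_id_c cs ≠ ['0']) :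
    (get_parent_id_c cs).length < cs.length := by
  unfold get_parent_id_c at *
  by_cases hin : PySem.Chars.isIn ['_'] cs = true
  · obtain ⟨a, t, hcs, ht⟩ := pv_exists_last_underscore ((pv_isIn_underscore cs).mp hin)
    rw [if_pos hin, hcs, pv_rsplitPrefix_eq a t ht]
    simp only [List.length_append, List.length_cons]
    omega
  · rw [if_neg hin] at h
    exact absurd rfl h

-- A's while-loop: compute the parent, append it, stop when it is "0", else continue from it
def get_ancestor_chain_c (cs : List Char) : List (List Char) :=
  if _h : get_parent_id_c cs = ['0'] then [get_parent_id_c cs]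
  else get_parent_id_c cs :: get_ancestor_chain_c (get_parent_id_c cs)
termination_by cs.length
decreasing_by exact pv_parent_length_lt cs _h

def get_ancestor_chain (task_id : String) : List String :=
  (get_ancestor_chain_c task_id.toList).map String.mk

-- ===== PORT B =====
-- Source B: cuts = [i for i, c in enumerate(task_id) if c == '_']
--       chain = [task_id[:i] for i in reversed(cuts)] + ['0']
--       return chain[:chain.index('0') + 1]
def get_ancestor_chain_alt_c (cs : List Char) : List (List Char) :=
  let cuts : List Int := ((PySem.List.enumerate cs).filter (fun p => p.2 == '_')).map (·.1)
  let chain := (cuts.reverse.map (fun i => PySem.List.slice cs none (some i))) ++ [['0']]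
  match PySem.List.index? chain ['0'] with
  | some k => PySem.List.slice chain none (some ((k : Int) + 1))
  | none => chain  -- unreachable: '0' was appended, so .index never raises

def get_ancestor_chain_alt (task_id : String) : List String :=
  (get_ancestor_chain_alt_c task_id.toList).map String.mk

-- ===== PRECONDITION & SPEC =====
def Spec_get_ancestor_chain (task_id : String) (out : List String) : Prop := out = get_ancestor_chain_alt task_id
instance (task_id : String) (out : List String) : Decidable (Spec_get_ancestor_chain task_id out) := by unfold Spec_get_ancestor_chain; infer_instance

-- ===== CLAIM (what is proved, stated in full; the proofs are below) =====
def Claim_equal_get_ancestor_chain : Prop := ∀ (task_id : String), Dom_get_ancestor_chain task_id → Spec_get_ancestor_chain task_id (get_ancestor_chain task_id)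

-- ===== LEMMAS AND PROOFS =====

-- the underscore positions of cs, as B computes them
def pvCuts (cs : List Char) : List Int :=
  ((PySem.List.enumerate cs).filter (fun p => p.2 == '_')).map (·.1)

-- the untruncated chain of B
def pvFull (cs : List Char) : List (List Char) :=
  ((pvCuts cs).reverse.map (fun i => PySem.List.slice cs none (some i))) ++ [['0']]

-- truncation at the first ['0'] inclusive
def pvTrunc (l : List (List Char)) : List (List Char) :=
  match PySem.List.index? l ['0'] with
  | some k => l.take (k + 1)
  | none => l

lemma pvCuts_mem {cs : List Char} {i : Int} (h : i ∈ pvCuts cs) :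
    ∃ k : Nat, i = (k : Int) ∧ k < cs.length := by
  unfold pvCuts at h
  obtain ⟨p, hp, hpi⟩ := List.mem_map.mp h
  obtain ⟨p', hp'⟩ := List.mem_filter.mp hp
  obtain ⟨k, hk, hpk⟩ := (PySem.List.mem_enumerate_iff cs 0 p).mp p'
  exact ⟨k, by simp [hpk] at hpi ⊢; omega, hk⟩

lemma pvCuts_not_mem {cs : List Char} (h : '_' ∉ cs) : pvCuts cs = [] := by
  unfold pvCuts
  rw [List.filter_eq_nil_iff.mpr, List.map_nil]
  intro p hp
  obtain ⟨k, hk, hpk⟩ := (PySem.List.mem_enumerate_iff cs 0 p).mp hp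
  have : cs[k] ∈ cs := List.getElem_mem hk
  simp [hpk]
  intro hc; exact h (hc ▸ this)

lemma pvCuts_last (a t : List Char) (ht : '_' ∉ t) :
    pvCuts (a ++ '_' :: t) = pvCuts a ++ [(a.length : Int)] := by
  unfold pvCuts
  rw [PySem.List.enumerate_append, List.filter_append, List.map_append]
  congr 1
  have henum : PySem.List.enumerate ('_' :: t) (0 + (a.length : Int)) =
      ((0 + (a.length : Int)), '_') :: PySem.List.enumerate t (0 + (a.length : Int) + 1) :=
    PySem.List.enumerate_cons _ _ _
  rw [henum, List.filter_cons]
  simp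
  intro i b hp hc
  obtain ⟨k, hk, hpk⟩ := (PySem.List.mem_enumerate_iff t _ _).mp hp
  have hb : b = t[k] := by simpa using congrArg Prod.snd hpk
  have hm : t[k] ∈ t := List.getElem_mem hk
  rw [← hb, hc] at hm
  exact ht hm

lemma pvFull_no {cs : List Char} (h : '_' ∉ cs) : pvFull cs = [['0']] := by
  unfold pvFull
  rw [pvCuts_not_mem h]
  simp

lemma pvFull_step (a t : List Char) (ht : '_' ∉ t) :
    pvFull (a ++ '_' :: t) = a :: pvFull a := by
  unfold pvFull
  rw [pvCuts_last a t ht]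
  simp only [List.reverse_append, List.reverse_cons, List.reverse_nil, List.nil_append,
    List.map_cons, List.cons_append]
  congr 1
  · rw [PySem.List.slice_to _ (by positivity)]
    simp [List.take_append_of_le_length (le_refl a.length)]
  · congr 1
    apply List.map_congr_left
    intro i hi
    obtain ⟨k, hik, hk⟩ := pvCuts_mem (List.mem_reverse.mp hi)
    subst hik
    rw [PySem.List.slice_to _ (by positivity), PySem.List.slice_to _ (by positivity)]
    simp [List.take_append_of_le_length (le_of_lt hk)]

lemma pvTrunc_cons_self (l : List (List Char)) : pvTrunc (['0'] :: l) = [['0']] := by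
  unfold pvTrunc
  rw [PySem.List.index?_cons_self]
  simp

lemma pvTrunc_cons_ne {x : List Char} (l : List (List Char)) (hx : x ≠ ['0']) :
    pvTrunc (x :: l) = x :: pvTrunc l := by
  unfold pvTrunc
  rw [PySem.List.index?_cons_of_ne l hx]
  cases h : PySem.List.index? l ['0'] with
  | none => simp
  | some k => simp

-- B's port equals the truncated full chain
lemma alt_eq_trunc (cs : List Char) : get_ancestor_chain_alt_c cs = pvTrunc (pvFull cs) := by
  unfold get_ancestor_chain_alt_c pvTrunc
  show (match PySem.List.index? (pvFull cs) ['0'] with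
        | some k => PySem.List.slice (pvFull cs) none (some ((k : Int) + 1))
        | none => pvFull cs) = _
  cases h : PySem.List.index? (pvFull cs) ['0'] with
  | none => rfl
  | some k =>
    show PySem.List.slice (pvFull cs) none (some ((k : Int) + 1)) = List.take (k + 1) (pvFull cs)
    rw [PySem.List.slice_to _ (by omega : (0 : Int) ≤ (k : Int) + 1)]
    have hk : ((k : Int) + 1).toNat = k + 1 := by omega
    rw [hk]

-- A's port on a string without '_'
lemma chain_no (cs : List Char) (h : '_' ∉ cs) :
    get_ancestor_chain_c cs = pvTrunc (pvFull cs) := by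
  have hin : ¬ (PySem.Chars.isIn ['_'] cs = true) := fun hh => h ((pv_isIn_underscore cs).mp hh)
  have hpar : get_parent_id_c cs = ['0'] := by unfold get_parent_id_c; exact if_neg hin
  rw [get_ancestor_chain_c, dif_pos hpar, hpar, pvFull_no h]
  have : pvTrunc (['0'] :: ([] : List (List Char))) = [['0']] := pvTrunc_cons_self []
  simpa using this.symm

-- A's port equals the truncated full chain (strong induction on the length)
lemma chain_eq_trunc : ∀ n (cs : List Char), cs.length ≤ n →
    get_ancestor_chain_c cs = pvTrunc (pvFull cs) := by
  intro n
  induction n with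
  | zero =>
    intro cs hlen
    have hcs : cs = [] := by
      cases cs with
      | nil => rfl
      | cons c l => simp at hlen
    exact hcs ▸ chain_no [] (by simp)
  | succ n ih =>
    intro cs hlen
    by_cases hmem : '_' ∈ cs
    · obtain ⟨a, t, hcs, ht⟩ := pv_exists_last_underscore hmem
      have hin : PySem.Chars.isIn ['_'] cs = true := (pv_isIn_underscore cs).mpr hmem
      have hpar : get_parent_id_c cs = a := by
        unfold get_parent_id_c
        rw [if_pos hin, hcs, pv_rsplitPrefix_eq a t ht]
      have hfull : pvFull cs = a :: pvFull a := by rw [hcs]; exact pvFull_step a t ht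
      by_cases ha : a = ['0']
      · rw [get_ancestor_chain_c, hpar, dif_pos ha, hfull, ha, pvTrunc_cons_self]
      · have hlen' : a.length ≤ n := by
          have hl : cs.length = a.length + 1 + t.length := by
            rw [hcs]; simp only [List.length_append, List.length_cons]; omega
          omega
        rw [get_ancestor_chain_c, hpar, dif_neg ha, hfull, pvTrunc_cons_ne _ ha, ih a hlen']
    · exact chain_no cs hmem

-- ===== VERDICT (by name: the statement is the Claim_ definition above) =====
theorem get_ancestor_chain_spec : Claim_equal_get_ancestor_chain := by
  intro task_id _
  unfold Spec_get_ancestor_chain get_ancestor_chain get_ancestor_chain_alt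
  rw [chain_eq_trunc task_id.toList.length task_id.toList (le_refl _), ← alt_eq_trunc]
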